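-- pv_equiv track=rewrite | github.com/lotemtzur/CBioHackathon | utils.py | compare_predictions
-- ===== SOURCE A (Python) =====
-- def compare_predictions(predictions, test_edges, non_train_edges):
--     tp = fp = tn = fn = 0
--
--     test_set = set()
--     for u, v, _ in test_edges:
--         test_set.add(tuple(sorted((u, v))))
--
--     for (u, v) in non_train_edges:
--         pred = predictions.get((u, v), predictions.get((v, u), False))
--
--         actual = tuple(sorted((u, v))) in test_set
--
--         if pred and actual:
--             tp += 1
--         elif pred and not actual:
--             fp += 1
--         elif not pred and not actual:
--             tn += 1
--         elif not pred and actual: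
--             fn += 1
--
--     return tp, fp, tn, fn
-- ===== SOURCE B (Python) =====
-- def compare_predictions(predictions, test_edges, non_train_edges):
--     test_set = {(min(u, v), max(u, v)) for u, v, _ in test_edges}
--     flags = [(bool(predictions.get((u, v), predictions.get((v, u), False))),
--               (min(u, v), max(u, v)) in test_set)
--              for u, v in non_train_edges]
--     n = len(flags)
--     p = sum(1 for pr, _ in flags if pr)
--     a = sum(1 for _, ac in flags if ac)
--     tp = sum(1 for pr, ac in flags if pr and ac)
--     return tp, p - tp, n - p - a + tp, a - tp
-- ===== Notes on version B (the rewrite author's own statement) =====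
-- stated objective: alternative
-- what changed: Replaces the four-way if/elif running counters with a classification pass that materialises (pred, actual) flags and derives FP/TN/FN arithmetically from three tallies (predicted, actual, true-positive) and the list length.
import Mathlib
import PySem

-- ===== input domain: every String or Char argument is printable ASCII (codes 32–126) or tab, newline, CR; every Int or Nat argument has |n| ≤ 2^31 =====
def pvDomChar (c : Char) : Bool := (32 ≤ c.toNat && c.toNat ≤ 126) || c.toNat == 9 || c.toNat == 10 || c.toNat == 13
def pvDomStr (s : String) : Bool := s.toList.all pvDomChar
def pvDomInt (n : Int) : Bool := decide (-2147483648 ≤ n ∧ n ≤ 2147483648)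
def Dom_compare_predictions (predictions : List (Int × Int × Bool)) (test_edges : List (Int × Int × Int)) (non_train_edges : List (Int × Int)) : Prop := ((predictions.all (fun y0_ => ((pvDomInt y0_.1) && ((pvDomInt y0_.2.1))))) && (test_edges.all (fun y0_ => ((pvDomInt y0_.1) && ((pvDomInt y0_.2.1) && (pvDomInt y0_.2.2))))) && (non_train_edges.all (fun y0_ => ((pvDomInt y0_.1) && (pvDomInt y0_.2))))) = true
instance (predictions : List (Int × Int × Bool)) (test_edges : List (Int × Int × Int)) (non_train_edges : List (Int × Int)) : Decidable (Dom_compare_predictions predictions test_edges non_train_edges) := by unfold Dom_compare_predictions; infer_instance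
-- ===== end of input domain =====

-- B replaces A's four-way if/elif accumulator with a flags list and derives FP/TN/FN
-- arithmetically from three tallies and the length (objective: alternative; same cost).


-- ===== PORT A =====
-- predictions.get((u,v), predictions.get((v,u), False)) on the assoc list (first match);
-- shared by both ports because both Pythons contain this exact expression
def cpGetPred (predictions : List (Int × Int × Bool)) (u v : Int) : Bool :=
  match (predictions.find? (fun t => t.1 == u && t.2.1 == v)).map (fun t => t.2.2) with
  | some b => b
  | none => ((predictions.find? (fun t => t.1 == v && t.2.1 == u)).map (fun t => t.2.2)).getD false

def compare_predictions (predictions : List (Int × Int × Bool)) (test_edges : List (Int × Int × Int)) (non_train_edges : List (Int × Int)) : Int × Int × Int × Int :=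
  -- test_set built by adding tuple(sorted((u,v))) for each test edge
  let test_set : PySem.Set (Int × Int) :=
    test_edges.foldl (fun s e => PySem.Set.add s (if e.1 ≤ e.2.1 then (e.1, e.2.1) else (e.2.1, e.1))) PySem.Set.empty
  non_train_edges.foldl (fun (st : Int × Int × Int × Int) uv =>
    let pred := cpGetPred predictions uv.1 uv.2
    let actual := PySem.Set.contains test_set (if uv.1 ≤ uv.2 then (uv.1, uv.2) else (uv.2, uv.1))
    if pred && actual then (st.1 + 1, st.2.1, st.2.2.1, st.2.2.2)
    else if pred && !actual then (st.1, st.2.1 + 1, st.2.2.1, st.2.2.2)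
    else if !pred && !actual then (st.1, st.2.1, st.2.2.1 + 1, st.2.2.2)
    else if !pred && actual then (st.1, st.2.1, st.2.2.1, st.2.2.2 + 1)
    else st) (0, 0, 0, 0)

-- ===== PORT B =====
def compare_predictions_alt (predictions : List (Int × Int × Bool)) (test_edges : List (Int × Int × Int)) (non_train_edges : List (Int × Int)) : Int × Int × Int × Int :=
  let test_set : PySem.Set (Int × Int) :=
    PySem.Set.ofList (test_edges.map (fun e => (min e.1 e.2.1, max e.1 e.2.1)))
  let flags : List (Bool × Bool) :=
    non_train_edges.map (fun uv =>
      (cpGetPred predictions uv.1 uv.2, PySem.Set.contains test_set (min uv.1 uv.2, max uv.1 uv.2)))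
  let n : Int := flags.length
  let p : Int := (flags.filter (fun f => f.1)).length
  let a : Int := (flags.filter (fun f => f.2)).length
  let tp : Int := (flags.filter (fun f => f.1 && f.2)).length
  (tp, p - tp, n - p - a + tp, a - tp)

-- ===== PRECONDITION & SPEC =====
def Spec_compare_predictions (predictions : List (Int × Int × Bool)) (test_edges : List (Int × Int × Int)) (non_train_edges : List (Int × Int)) (out : Int × Int × Int × Int) : Prop := out = compare_predictions_alt predictions test_edges non_train_edges
instance (predictions : List (Int × Int × Bool)) (test_edges : List (Int × Int × Int)) (non_train_edges : List (Int × Int)) (out : Int × Int × Int × Int) : Decidable (Spec_compare_predictions predictions test_edges non_train_edges out) := by unfold Spec_compare_predictions; infer_instance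

-- ===== CLAIM (what is proved, stated in full; the proofs are below) =====
def Claim_equal_compare_predictions : Prop := ∀ (predictions : List (Int × Int × Bool)) (test_edges : List (Int × Int × Int)) (non_train_edges : List (Int × Int)), Dom_compare_predictions predictions test_edges non_train_edges → Spec_compare_predictions predictions test_edges non_train_edges (compare_predictions predictions test_edges non_train_edges)

-- ===== LEMMAS AND PROOFS =====

-- the two normalisations of an unordered edge coincide
theorem cp_key_eq (u v : Int) :
    (if u ≤ v then (u, v) else (v, u)) = (min u v, max u v) := by
  split_ifs with h <;> simp only [Prod.mk.injEq, min_def, max_def] <;>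
    constructor <;> split_ifs <;> omega

-- A's loop from an arbitrary accumulator, characterised by filter counts
theorem cp_loop_eq (pr ac : Int × Int → Bool) (l : List (Int × Int)) (t f tn fn : Int) :
    l.foldl (fun (st : Int × Int × Int × Int) uv =>
      if pr uv && ac uv then (st.1 + 1, st.2.1, st.2.2.1, st.2.2.2)
      else if pr uv && !ac uv then (st.1, st.2.1 + 1, st.2.2.1, st.2.2.2)
      else if !pr uv && !ac uv then (st.1, st.2.1, st.2.2.1 + 1, st.2.2.2)
      else if !pr uv && ac uv then (st.1, st.2.1, st.2.2.1, st.2.2.2 + 1)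
      else st) (t, f, tn, fn) =
    (t + ((l.filter (fun uv => pr uv && ac uv)).length : Int),
     f + ((l.filter (fun uv => pr uv && !ac uv)).length : Int),
     tn + ((l.filter (fun uv => !pr uv && !ac uv)).length : Int),
     fn + ((l.filter (fun uv => !pr uv && ac uv)).length : Int)) := by
  induction l generalizing t f tn fn with
  | nil => simp
  | cons x xs ih =>
    cases hp : pr x <;> cases ha : ac x <;>
      simp only [List.foldl_cons, List.filter_cons, hp, ha, Bool.not_false, Bool.not_true,
        Bool.and_false, Bool.and_true, reduceIte,
        List.length_cons] <;>
      rw [ih] <;> simp only [Prod.mk.injEq] <;> push_cast <;> refine ⟨by ring, by ring, by ring, by ring⟩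

-- counts of the four cells partition the filters B tallies
theorem cp_counts (pr ac : Int × Int → Bool) (l : List (Int × Int)) :
    (l.filter (fun uv => pr uv)).length
        = (l.filter (fun uv => pr uv && ac uv)).length + (l.filter (fun uv => pr uv && !ac uv)).length
    ∧ (l.filter (fun uv => ac uv)).length
        = (l.filter (fun uv => pr uv && ac uv)).length + (l.filter (fun uv => !pr uv && ac uv)).length
    ∧ l.length
        = (l.filter (fun uv => pr uv && ac uv)).length + (l.filter (fun uv => pr uv && !ac uv)).length
          + (l.filter (fun uv => !pr uv && !ac uv)).length + (l.filter (fun uv => !pr uv && ac uv)).length := by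
  induction l with
  | nil => simp
  | cons x xs ih =>
    obtain ⟨h1, h2, h3⟩ := ih
    simp only [List.filter_cons, List.length_cons]
    cases hp : pr x <;> cases ha : ac x <;> simp <;> omega

-- A's whole loop equals B's flags-and-arithmetic computation, abstractly
theorem cp_main (pr ac : Int × Int → Bool) (l : List (Int × Int)) :
    l.foldl (fun (st : Int × Int × Int × Int) uv =>
      if pr uv && ac uv then (st.1 + 1, st.2.1, st.2.2.1, st.2.2.2)
      else if pr uv && !ac uv then (st.1, st.2.1 + 1, st.2.2.1, st.2.2.2)
      else if !pr uv && !ac uv then (st.1, st.2.1, st.2.2.1 + 1, st.2.2.2)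
      else if !pr uv && ac uv then (st.1, st.2.1, st.2.2.1, st.2.2.2 + 1)
      else st) (0, 0, 0, 0) =
    ((((l.map (fun uv => (pr uv, ac uv))).filter (fun f => f.1 && f.2)).length : Int),
     (((l.map (fun uv => (pr uv, ac uv))).filter (fun f => f.1)).length : Int)
       - (((l.map (fun uv => (pr uv, ac uv))).filter (fun f => f.1 && f.2)).length : Int),
     ((l.map (fun uv => (pr uv, ac uv))).length : Int)
       - (((l.map (fun uv => (pr uv, ac uv))).filter (fun f => f.1)).length : Int)
       - (((l.map (fun uv => (pr uv, ac uv))).filter (fun f => f.2)).length : Int)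
       + (((l.map (fun uv => (pr uv, ac uv))).filter (fun f => f.1 && f.2)).length : Int),
     (((l.map (fun uv => (pr uv, ac uv))).filter (fun f => f.2)).length : Int)
       - (((l.map (fun uv => (pr uv, ac uv))).filter (fun f => f.1 && f.2)).length : Int)) := by
  rw [cp_loop_eq]
  simp only [List.filter_map, List.length_map, Function.comp_def]
  obtain ⟨h1, h2, h3⟩ := cp_counts pr ac l
  simp only [Prod.mk.injEq]
  refine ⟨by omega, by omega, by omega, by omega⟩

-- ===== VERDICT (by name: the statement is the Claim_ definition above) =====
theorem compare_predictions_spec : Claim_equal_compare_predictions := by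
  intro preds te nte _
  unfold Spec_compare_predictions compare_predictions compare_predictions_alt
  simp only [cp_key_eq]
  have hset : te.foldl (fun s e => PySem.Set.add s (min e.1 e.2.1, max e.1 e.2.1)) PySem.Set.empty
      = PySem.Set.ofList (te.map (fun e => (min e.1 e.2.1, max e.1 e.2.1))) := by
    rw [PySem.Set.ofList_eq_foldl, List.foldl_map]; rfl
  rw [hset]
  exact cp_main (fun uv => cpGetPred preds uv.1 uv.2)
    (fun uv => PySem.Set.contains
      (PySem.Set.ofList (te.map (fun e => (min e.1 e.2.1, max e.1 e.2.1)))) (min uv.1 uv.2, max uv.1 uv.2)) nte
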